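-- pv_equiv track=rewrite | github.com/khandelwalsumit/AgenticAnalytics | app.py | _is_new_analysis_plan
-- ===== SOURCE A (Python) =====
-- from typing import Any
--
-- def _is_new_analysis_plan(tasks: list[dict[str, Any]]) -> bool:
--     """Detect whether plan tasks indicate a fresh analysis run is underway."""
--     if not tasks:
--         return False
--     statuses = {str(t.get("status", "")).strip().lower() for t in tasks if isinstance(t, dict)}
--     if not statuses:
--         return False
--     # Fresh/active runs have at least one actionable task and are not fully done.
--     has_actionable = bool(statuses & {"in_progress", "ready", "todo"})
--     all_done = all(s in {"done", ""} for s in statuses)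
--     return has_actionable and not all_done
-- ===== SOURCE B (Python) =====
-- from typing import Any
--
-- def _is_new_analysis_plan(tasks: list[dict[str, Any]]) -> bool:
--     """Detect whether plan tasks indicate a fresh analysis run is underway."""
--     has_dict = False
--     has_actionable = False
--     not_all_done = False
--     for t in tasks:
--         if isinstance(t, dict):
--             has_dict = True
--             s = str(t.get("status", "")).strip().lower()
--             if s in ("in_progress", "ready", "todo"):
--                 has_actionable = True
--             if s not in ("done", ""):
--                 not_all_done = True
--     return has_dict and has_actionable and not_all_done
-- ===== Notes on version B (the rewrite author's own statement) =====
-- stated objective: simpler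
-- what changed: Replaces A's build-a-set-of-normalized-statuses plus set-intersection/all() passes with a single fused pass over tasks that accumulates three booleans (saw a dict, saw an actionable status, saw a not-done status), never materializing the statuses set.
import Mathlib
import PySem

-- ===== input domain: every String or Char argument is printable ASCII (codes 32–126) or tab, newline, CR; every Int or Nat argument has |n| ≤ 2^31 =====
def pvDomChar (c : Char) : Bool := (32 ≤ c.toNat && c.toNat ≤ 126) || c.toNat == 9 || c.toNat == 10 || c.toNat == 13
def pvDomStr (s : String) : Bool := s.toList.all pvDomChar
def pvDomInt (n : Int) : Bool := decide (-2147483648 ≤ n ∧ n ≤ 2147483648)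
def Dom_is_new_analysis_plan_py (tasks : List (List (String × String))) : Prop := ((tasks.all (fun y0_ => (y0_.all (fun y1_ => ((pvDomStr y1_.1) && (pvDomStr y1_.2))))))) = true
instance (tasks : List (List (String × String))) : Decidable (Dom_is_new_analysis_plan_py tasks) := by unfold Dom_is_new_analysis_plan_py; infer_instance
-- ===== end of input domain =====

-- ===== PORT A =====
-- A: build the SET of normalized statuses, then test set intersection / all-done over the set.
-- (under the type convention every task IS a dict, so 'isinstance(t, dict)' is always true)
def pvNorm (t : List (String × String)) : String :=
  PySem.Str.lower (PySem.Str.strip (PySem.Dict.getD ⟨t⟩ "status" ""))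

def is_new_analysis_plan_py (tasks : List (List (String × String))) : Bool :=
  if tasks.isEmpty then false
  else
    let statuses : PySem.Set String := PySem.Set.ofList (tasks.map (fun t => pvNorm t))
    if statuses.isEmpty then false
    else
      let has_actionable := !(PySem.Set.inter statuses ["in_progress", "ready", "todo"]).isEmpty
      let all_done := statuses.all (fun s => s == "done" || s == "")
      has_actionable && !all_done

-- ===== PORT B =====
-- B: one pass, three booleans, no intermediate set (same result; different decomposition).
def is_new_analysis_plan_py_alt (tasks : List (List (String × String))) : Bool :=
  let r := tasks.foldl
    (fun (st : Bool × Bool × Bool) t =>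
      let s := pvNorm t
      (true,
       st.2.1 || ["in_progress", "ready", "todo"].contains s,
       st.2.2 || !(["done", ""].contains s)))
    (false, false, false)
  r.1 && r.2.1 && r.2.2

-- ===== PRECONDITION & SPEC =====
def Spec_is_new_analysis_plan_py (tasks : List (List (String × String))) (out : Bool) : Prop := out = is_new_analysis_plan_py_alt tasks
instance (tasks : List (List (String × String))) (out : Bool) : Decidable (Spec_is_new_analysis_plan_py tasks out) := by unfold Spec_is_new_analysis_plan_py; infer_instance

-- ===== CLAIM (what is proved, stated in full; the proofs are below) =====
def Claim_equal_is_new_analysis_plan_py : Prop := ∀ (tasks : List (List (String × String))), Dom_is_new_analysis_plan_py tasks → Spec_is_new_analysis_plan_py tasks (is_new_analysis_plan_py tasks)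

-- ===== LEMMAS AND PROOFS =====

-- B's fold: the three flags are "list nonempty", "some norm actionable", "some norm not done/empty".
theorem pv_foldB (l : List (List (String × String))) (a b c : Bool) :
    l.foldl
      (fun (st : Bool × Bool × Bool) t =>
        let s := pvNorm t
        (true,
         st.2.1 || ["in_progress", "ready", "todo"].contains s,
         st.2.2 || !(["done", ""].contains s)))
      (a, b, c)
    = (a || !l.isEmpty,
       b || l.any (fun t => ["in_progress", "ready", "todo"].contains (pvNorm t)),
       c || l.any (fun t => !(["done", ""].contains (pvNorm t)))) := by
  induction l generalizing a b c with
  | nil => simp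
  | cons x xs ih =>
    simp only [List.foldl_cons, List.any_cons, List.isEmpty_cons, ih]
    simp [Bool.or_assoc]

theorem pv_ofList_isEmpty {α : Type} [BEq α] [LawfulBEq α] (xs : List α) :
    (PySem.Set.ofList xs : List α).isEmpty = xs.isEmpty := by
  cases hx : xs with
  | nil => simp [PySem.Set.ofList_nil]
  | cons y ys =>
    simp only [List.isEmpty_cons]
    rw [List.isEmpty_eq_false_iff_exists_mem]
    exact ⟨y, by rw [PySem.Set.mem_ofList _ _]; simp⟩

theorem pv_inter_isEmpty {α : Type} [BEq α] [LawfulBEq α]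
    (s t : List α) :
    (PySem.Set.inter s t).isEmpty = !(s.any (fun x => t.contains x)) := by
  by_cases hx : ∃ x ∈ s, x ∈ t
  · obtain ⟨x, hs, ht⟩ := hx
    have h1 : (PySem.Set.inter s t).isEmpty = false := by
      rw [List.isEmpty_eq_false_iff_exists_mem]
      exact ⟨x, by rw [PySem.Set.mem_inter]; exact ⟨hs, ht⟩⟩
    have h2 : s.any (fun x => t.contains x) = true := by
      rw [List.any_eq_true]
      exact ⟨x, hs, by simpa using ht⟩
    rw [h1, h2, Bool.not_true]
  · push Not at hx
    have h1 : (PySem.Set.inter s t).isEmpty = true := by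
      rw [List.isEmpty_iff, List.eq_nil_iff_forall_not_mem]
      intro x hxm
      rw [PySem.Set.mem_inter] at hxm
      exact hx x hxm.1 hxm.2
    have h2 : s.any (fun x => t.contains x) = false := by
      rw [List.any_eq_false]
      intro x hs
      simpa using hx x hs
    rw [h1, h2, Bool.not_false]

theorem pv_ofList_any {α : Type} [BEq α] [LawfulBEq α] (xs : List α) (p : α → Bool) :
    (PySem.Set.ofList xs : List α).any p = xs.any p := by
  rcases h : xs.any p with _ | _
  · simp only [List.any_eq_false] at h ⊢
    intro x hx
    exact h x ((PySem.Set.mem_ofList _ _).mp hx)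
  · rw [List.any_eq_true] at h ⊢
    obtain ⟨x, hx, hp⟩ := h
    exact ⟨x, (PySem.Set.mem_ofList _ _).mpr hx, hp⟩

theorem pv_ofList_all {α : Type} [BEq α] [LawfulBEq α] (xs : List α) (p : α → Bool) :
    (PySem.Set.ofList xs : List α).all p = xs.all p := by
  have h1 := pv_ofList_any xs (fun x => !p x)
  simpa [List.all_eq_not_any_not] using congrArg (fun b => !b) h1

-- ===== VERDICT (by name: the statement is the Claim_ definition above) =====
theorem is_new_analysis_plan_py_spec : Claim_equal_is_new_analysis_plan_py := by
  intro tasks _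
  unfold Spec_is_new_analysis_plan_py is_new_analysis_plan_py is_new_analysis_plan_py_alt
  rw [pv_foldB]
  simp only [Bool.false_or]
  rw [pv_inter_isEmpty, pv_ofList_any, pv_ofList_isEmpty, pv_ofList_all,
      List.any_map, List.all_map, List.isEmpty_map]
  cases h : tasks.isEmpty with
  | true => simp
  | false =>
    rw [if_neg (by simp), if_neg (by simp)]
    simp only [Bool.not_false, Bool.true_and, Bool.not_not, Function.comp_def,
      List.contains_cons, List.contains_nil, Bool.or_false]
    congr 1
    rw [List.all_eq_not_any_not, Bool.not_not]
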